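-- pv_equiv track=rewrite | github.com/City-Centre-Dawah/Orphanages | backend/webhooks/tasks.py | _tg_escape
-- ===== SOURCE A (Python) =====
-- def _tg_escape(text):
--     """Escape special characters for Telegram MarkdownV2."""
--     special = r"_[]()~`>#+-=|{}.!"
--     result = ""
--     for ch in str(text):
--         if ch in special:
--             result += f"\\{ch}"
--         else:
--             result += ch
--     return result
-- ===== SOURCE B (Python) =====
-- _SPECIAL = "_[]()~`>#+-=|{}.!"
--
--
-- def _tg_escape(text):
--     """Escape special characters for Telegram MarkdownV2."""
--     s = str(text)
--     for c in _SPECIAL: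
--         s = s.replace(c, "\\" + c)
--     return s
-- ===== Notes on version B (the rewrite author's own statement) =====
-- stated objective: alternative
-- what changed: Replaced the single char-by-char Python loop with string accumulation by 17 staged whole-string str.replace passes, one per special character; correct because backslash is not special and the special characters are pairwise distinct, so passes cannot interfere.
import Mathlib
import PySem

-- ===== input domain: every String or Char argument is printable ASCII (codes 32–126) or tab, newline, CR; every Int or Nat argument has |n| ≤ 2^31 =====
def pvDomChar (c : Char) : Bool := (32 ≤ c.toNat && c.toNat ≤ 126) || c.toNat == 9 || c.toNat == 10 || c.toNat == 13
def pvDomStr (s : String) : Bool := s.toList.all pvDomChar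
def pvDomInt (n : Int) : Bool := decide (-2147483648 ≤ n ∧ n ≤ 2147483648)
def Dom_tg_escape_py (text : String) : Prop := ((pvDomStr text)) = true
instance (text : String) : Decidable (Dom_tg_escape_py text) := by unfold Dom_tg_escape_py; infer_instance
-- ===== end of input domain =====

-- B replaces A's single char-by-char loop by 17 staged whole-string str.replace passes
-- (one per special character); objective: alternative decomposition, same result.

-- ===== PORT A =====
-- special = r"_[]()~`>#+-=|{}.!"
def tgSpecialA : List Char := "_[]()~`>#+-=|{}.!".toList

-- result = ""; for ch in str(text): if ch in special: result += "\" + ch else: result += ch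
def tg_escape_py (text : String) : String :=
  String.ofList (text.toList.foldl
    (fun acc ch => if tgSpecialA.contains ch then acc ++ ['\\', ch] else acc ++ [ch]) [])

-- ===== PORT B =====
-- _SPECIAL = "_[]()~`>#+-=|{}.!"
def tgSpecialB : List Char := "_[]()~`>#+-=|{}.!".toList

-- s = str(text); for c in _SPECIAL: s = s.replace(c, "\" + c); return s
def tg_escape_py_alt (text : String) : String :=
  tgSpecialB.foldl
    (fun s c => PySem.Str.replace s (String.ofList [c]) (String.ofList ['\\', c])) text

-- ===== PRECONDITION & SPEC =====
def Spec_tg_escape_py (text : String) (out : String) : Prop := out = tg_escape_py_alt text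
instance (text : String) (out : String) : Decidable (Spec_tg_escape_py text out) := by unfold Spec_tg_escape_py; infer_instance

-- ===== CLAIM (what is proved, stated in full; the proofs are below) =====
def Claim_equal_tg_escape_py : Prop := ∀ (text : String), Dom_tg_escape_py text → Spec_tg_escape_py text (tg_escape_py text)

-- ===== LEMMAS AND PROOFS =====

-- Chars.replace.go with a single-character pattern is a per-character substitution.
theorem tg_go_single (d : Char) (new : List Char) :
    ∀ (fuel : Nat) (l acc : List Char), l.length ≤ fuel →
      PySem.Chars.replace.go [d] new fuel l acc
        = acc.reverse ++ l.flatMap (fun c => if c = d then new else [c]) := by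
  intro fuel
  induction fuel with
  | zero =>
    intro l acc h
    have : l = [] := List.eq_nil_of_length_eq_zero (Nat.le_zero.mp h)
    subst this; simp [PySem.Chars.replace.go]
  | succ n ih =>
    intro l acc h
    cases l with
    | nil => simp [PySem.Chars.replace.go]
    | cons c t =>
      simp only [PySem.Chars.replace.go]
      by_cases hc : c = d
      · subst hc
        have hp : List.isPrefixOf [c] (c :: t) = true := by
          simp [List.isPrefixOf]
        simp only [hp, if_true]
        rw [ih (List.drop [c].length (c :: t)) (new.reverse ++ acc)
             (by simp at h ⊢; omega)]
        simp [List.flatMap_cons]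
      · have hp : List.isPrefixOf [d] (c :: t) = false := by
          simp [List.isPrefixOf]; exact fun h => hc h.symm
        simp only [hp, Bool.false_eq_true, if_false]
        rw [ih t (c :: acc) (by simp at h; omega)]
        simp [List.flatMap_cons, hc]

theorem tg_replace_single (s : List Char) (d : Char) (new : List Char) :
    PySem.Chars.replace s [d] new = s.flatMap (fun c => if c = d then new else [c]) := by
  rw [PySem.Chars.replace.eq_def]
  simp only [List.isEmpty, Bool.false_eq_true, if_false]
  exact tg_go_single d new s.length s [] (le_refl _)

-- the escaped form of s after the characters in `seen` have been processed
def tgEsc (seen : List Char) (s : List Char) : List Char :=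
  s.flatMap (fun c => if c ∈ seen then ['\\', c] else [c])

-- one replace pass on an already partially escaped string processes exactly one more character
theorem tg_pass (d : Char) (seen : List Char) (hd : d ∉ seen) (hb : d ≠ '\\') :
    ∀ s : List Char,
      (tgEsc seen s).flatMap (fun c => if c = d then ['\\', d] else [c])
        = tgEsc (seen ++ [d]) s := by
  intro s
  induction s with
  | nil => simp [tgEsc]
  | cons a t ih =>
    simp only [tgEsc, List.flatMap_cons, List.flatMap_append] at *
    rw [ih]
    by_cases ha : a ∈ seen
    · have had : a ≠ d := fun h => hd (h ▸ ha)
      simp [ha, had, Ne.symm hb, List.mem_append]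
    · by_cases had : a = d
      · subst had; simp [ha, List.mem_append]
      · simp [ha, had, List.mem_append]

-- folding the passes over a list of fresh distinct non-backslash characters
theorem tg_fold (s : List Char) :
    ∀ (l seen : List Char), (seen ++ l).Nodup → ('\\' ∈ seen ++ l → False) →
      l.foldl (fun t d => t.flatMap (fun c => if c = d then ['\\', d] else [c])) (tgEsc seen s)
        = tgEsc (seen ++ l) s := by
  intro l
  induction l with
  | nil => intro seen _ _; simp
  | cons d t ih =>
    intro seen hnd hb
    simp only [List.foldl_cons]
    have hd : d ∉ seen := by
      have h2 := List.disjoint_of_nodup_append hnd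
      intro hmem; exact h2 hmem (by simp)
    rw [tg_pass d seen hd (by intro h; exact hb (by simp [h]))]
    rw [ih (seen ++ [d]) (by simpa using hnd) (by intro h; exact hb (by simpa using h))]
    simp

-- A's accumulator loop computes tgEsc tgSpecialA
theorem tg_a_char (s : List Char) :
    ∀ acc : List Char,
      s.foldl (fun acc ch => if tgSpecialA.contains ch then acc ++ ['\\', ch] else acc ++ [ch]) acc
        = acc ++ tgEsc tgSpecialA s := by
  induction s with
  | nil => intro acc; simp [tgEsc]
  | cons a t ih =>
    intro acc
    simp only [List.foldl_cons, tgEsc, List.flatMap_cons, List.contains_iff_mem] at ih ⊢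
    by_cases h : a ∈ tgSpecialA
    · rw [if_pos h, if_pos h, ih]; simp
    · rw [if_neg h, if_neg h, ih]; simp

-- ===== VERDICT (by name: the statement is the Claim_ definition above) =====
theorem tg_escape_py_spec : Claim_equal_tg_escape_py := by
  intro text _
  unfold Spec_tg_escape_py tg_escape_py tg_escape_py_alt
  apply String.toList_injective
  have hb : ∀ (l : List Char) (s : String),
      (l.foldl (fun s c => PySem.Str.replace s (String.ofList [c]) (String.ofList ['\\', c])) s).toList
        = l.foldl (fun t d => t.flatMap (fun c => if c = d then ['\\', d] else [c])) s.toList := by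
    intro l
    induction l with
    | nil => intro s; rfl
    | cons d t ih =>
      intro s
      simp only [List.foldl_cons, ih, PySem.Str.toList_replace]
      rw [show (String.ofList [d]).toList = [d] by simp,
          show (String.ofList ['\\', d]).toList = ['\\', d] by simp,
          tg_replace_single]
  rw [tg_a_char text.toList [], hb tgSpecialB text]
  have h0 : text.toList = tgEsc [] text.toList := by simp [tgEsc]
  conv_rhs => rw [h0]
  rw [tg_fold text.toList tgSpecialB [] (by decide) (by decide)]
  simp [tgSpecialA, tgSpecialB]
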